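-- pv_equiv track=rewrite | github.com/Taehyeon-Kim/ThisIsCodingTest | 3-DFS+BFS/18-괄호변환/solution.py | solution
-- ===== SOURCE A (Python) =====
-- def check(p):  # 올바른 문자열인지 체크
--     stack = []
--     try:
--         for i in p:
--             if i == '(':
--                 stack.append('(')
--             else:
--                 stack.pop()
--         return True
--     except:
--         return False
--
-- def divide(p):  # u, v로 나누기
--     count = [0, 0]
--     for i in p:
--         if i == '(':
--             count[0] += 1
--         else:
--             count[1] += 1
--         if count[0] == count[1]:
--             break
--     return p[:sum(count)], p[sum(count):]
--
-- def convert(u):  # 괄호 방향 뒤집어주기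
--     temp = ''
--     for i in u:
--         if i == '(':
--             temp += ')'
--         else:
--             temp += '('
--     return temp
--
-- def solution(p):
--     answer = ''
--
--     while len(p) != 0:
--         u, p = divide(p)
--         if check(u):
--             answer += u
--         else:
--             answer += '(' + solution(p) + ')' + convert(u[1:-1])
--             break
--
--     return answer
-- ===== SOURCE B (Python) =====
-- def solution(p):
--     if not p:
--         return ''
--     bal = 0
--     n = 0
--     for ch in p:
--         bal += 1 if ch == '(' else -1
--         n += 1
--         if bal == 0:
--             break
--     u, v = p[:n], p[n:]
--     if p[0] == '(':
--         return u + solution(v)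
--     return '(' + solution(v) + ')' + ''.join(')' if c == '(' else '(' for c in u[1:-1])
-- ===== Notes on version B (the rewrite author's own statement) =====
-- stated objective: simpler
-- what changed: A's while loop with an answer accumulator plus separate check/divide/convert helpers becomes one direct recursive recurrence: the split point is found by a single inline balance-counter scan, the try/except stack-based check of the prefix is replaced by a constant-time test of the first character (correct because the prefix is the shortest one with equal counts, so its balance never crosses zero inside), and the flipping helper becomes a comprehension.
import Mathlib
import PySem

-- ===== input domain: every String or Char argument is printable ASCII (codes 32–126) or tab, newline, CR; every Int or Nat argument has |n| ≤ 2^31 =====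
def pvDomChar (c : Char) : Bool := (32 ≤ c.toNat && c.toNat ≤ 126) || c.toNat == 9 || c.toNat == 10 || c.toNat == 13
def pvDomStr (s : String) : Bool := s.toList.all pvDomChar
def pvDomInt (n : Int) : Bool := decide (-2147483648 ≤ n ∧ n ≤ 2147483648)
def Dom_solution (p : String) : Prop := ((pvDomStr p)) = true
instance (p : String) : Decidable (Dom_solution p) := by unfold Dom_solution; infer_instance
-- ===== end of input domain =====

-- B replaces A's while-loop accumulation by a direct recursive recurrence, inlines divide as one
-- balance-counter scan, replaces the try/except stack check by an O(1) first-character test and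
-- convert by a comprehension; objective: simpler (same asymptotic cost).

-- ===== PORT A =====
-- check(p): stack of '(', pop on anything else; empty pop = exception = False
def checkA : List Char → List Char → Bool
  | _, [] => true
  | stack, c :: rest =>
    if c = '(' then checkA ('(' :: stack) rest
    else
      match stack with
      | [] => false
      | _ :: s => checkA s rest

-- divide(p): returns sum(count) at the break (or end); u = take n, v = drop n
def divLenA : List Char → Nat → Nat → Nat
  | [], a, b => a + b
  | c :: rest, a, b =>
    if c = '(' then
      (if a + 1 = b then (a + 1) + b else divLenA rest (a + 1) b)
    else
      (if a = b + 1 then a + (b + 1) else divLenA rest a (b + 1))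

def convertA : List Char → List Char
  | [] => []
  | c :: rest => (if c = '(' then ')' else '(') :: convertA rest

theorem divLenA_ge : ∀ (l : List Char) (a b : Nat), a + b ≤ divLenA l a b := by
  intro l
  induction l with
  | nil => intro a b; simp [divLenA]
  | cons c rest ih =>
    intro a b
    simp only [divLenA]
    split_ifs with h1 h2 h3
    · omega
    · have := ih (a + 1) b; omega
    · omega
    · have := ih a (b + 1); omega

theorem divLenA_cons_ge (c : Char) (rest : List Char) (a b : Nat) :
    a + b + 1 ≤ divLenA (c :: rest) a b := by
  simp only [divLenA]
  split_ifs with h1 h2 h3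
  · omega
  · have := divLenA_ge rest (a + 1) b; omega
  · omega
  · have := divLenA_ge rest a (b + 1); omega

-- solution(p): the while loop becomes the tail-recursive solALoop carrying `answer`;
-- the recursive call solution(p) inside the loop body is solAList.
mutual
def solALoop (answer : List Char) (p : List Char) : List Char :=
  match p with
  | [] => answer
  | c :: rest =>
    let n := divLenA (c :: rest) 0 0
    let u := (c :: rest).take n
    let v := (c :: rest).drop n
    if checkA [] u then solALoop (answer ++ u) v
    else answer ++ '(' :: (solAList v ++ ')' :: convertA (u.drop 1).dropLast)
  termination_by 2 * p.length
  decreasing_by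
  · have h1 := divLenA_cons_ge c rest 0 0
    simp only [List.length_drop, List.length_cons]
    omega
  · have h1 := divLenA_cons_ge c rest 0 0
    simp only [List.length_drop, List.length_cons]
    omega

def solAList (p : List Char) : List Char := solALoop [] p
  termination_by 2 * p.length + 1
end

def solution (p : String) : String := String.mk (solAList p.toList)

-- ===== PORT B =====
-- the inlined divide scan: one balance counter, n = length scanned
def splitLenB : List Char → Int → Nat → Nat
  | [], _, n => n
  | c :: rest, bal, n =>
    let bal' := bal + (if c = '(' then 1 else -1)
    if bal' = 0 then n + 1 else splitLenB rest bal' (n + 1)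

theorem splitLenB_ge : ∀ (l : List Char) (bal : Int) (n : Nat), n ≤ splitLenB l bal n := by
  intro l
  induction l with
  | nil => intro bal n; simp [splitLenB]
  | cons c rest ih =>
    intro bal n
    simp only [splitLenB]
    split_ifs
    all_goals first
      | omega
      | exact le_trans (Nat.le_succ n) (ih _ _)

def solB (p : List Char) : List Char :=
  match p with
  | [] => []
  | c :: rest =>
    let n := splitLenB (c :: rest) 0 0
    let u := (c :: rest).take n
    let v := (c :: rest).drop n
    if PySem.List.pyGet? (c :: rest) 0 = some '(' then u ++ solB v
    else '(' :: (solB v ++ ')' :: ((u.drop 1).dropLast.map fun x => if x = '(' then ')' else '('))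
  termination_by p.length
  decreasing_by
  all_goals
    have h1 : (1 : Nat) ≤ splitLenB (c :: rest) 0 0 := by
      simp only [splitLenB]; split_ifs
      all_goals first
        | omega
        | exact splitLenB_ge rest _ 1
    simp only [List.length_drop, List.length_cons]
    omega

def solution_alt (p : String) : String := String.mk (solB p.toList)

-- ===== PRECONDITION & SPEC =====
def Spec_solution (p : String) (out : String) : Prop := out = solution_alt p
instance (p : String) (out : String) : Decidable (Spec_solution p out) := by unfold Spec_solution; infer_instance

-- ===== CLAIM (what is proved, stated in full; the proofs are below) =====
def Claim_equal_solution : Prop := ∀ (p : String), Dom_solution p → Spec_solution p (solution p)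

-- ===== LEMMAS AND PROOFS =====

-- The two split scans compute the same cut length.
theorem divLen_eq_splitLen : ∀ (l : List Char) (a b : Nat),
    divLenA l a b = splitLenB l ((a : Int) - b) (a + b) := by
  intro l
  induction l with
  | nil => intro a b; simp [divLenA, splitLenB]
  | cons c rest ih =>
    intro a b
    by_cases hc : c = '(' <;>
      simp only [divLenA, splitLenB, hc, if_true, if_false] <;>
      split_ifs with h1 h2 <;>
      try omega
    · convert ih (a + 1) b using 2 <;> (push_cast; omega)
    · convert ih a (b + 1) using 2 <;> (push_cast; omega)

-- convert is just the map
theorem convertA_eq_map : ∀ (l : List Char),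
    convertA l = l.map fun x => if x = '(' then ')' else '(' := by
  intro l; induction l with
  | nil => rfl
  | cons c rest ih => simp [convertA, ih]

-- While the running '('-count stays strictly above the other count, the stack never
-- underflows, so check succeeds on the produced prefix.
theorem checkA_take_divLen : ∀ (l : List Char) (a b : Nat) (stack : List Char),
    b < a → stack.length = a - b →
    checkA stack (l.take (divLenA l a b - (a + b))) = true := by
  intro l
  induction l with
  | nil => intro a b stack _ _; simp [divLenA, checkA]
  | cons c rest ih =>
    intro a b stack hab hlen
    by_cases hc : c = '('
    · have hne : ¬ (a + 1 = b) := by omega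
      have hd : divLenA (c :: rest) a b = divLenA rest (a + 1) b := by
        simp [divLenA, hc, hne]
      have hge : a + 1 + b ≤ divLenA rest (a + 1) b := divLenA_ge rest (a + 1) b
      rw [hd]
      have htake : (c :: rest).take (divLenA rest (a + 1) b - (a + b)) =
          c :: rest.take (divLenA rest (a + 1) b - (a + 1 + b)) := by
        have : divLenA rest (a + 1) b - (a + b) =
            (divLenA rest (a + 1) b - (a + 1 + b)) + 1 := by omega
        rw [this, List.take_succ_cons]
      rw [htake]
      simp only [checkA, hc, if_true]
      exact ih (a + 1) b ('(' :: stack) (by omega) (by simp [hlen]; omega)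
    · by_cases he : a = b + 1
      · have hd : divLenA (c :: rest) a b = a + (b + 1) := by
          simp [divLenA, hc, he]
        rw [hd]
        have : a + (b + 1) - (a + b) = 1 := by omega
        rw [this]
        have hs : ∃ x s, stack = x :: s := by
          cases stack with
          | nil => simp at hlen; omega
          | cons x s => exact ⟨x, s, rfl⟩
        obtain ⟨x, s, rfl⟩ := hs
        simp [checkA, hc]
      · have hd : divLenA (c :: rest) a b = divLenA rest a (b + 1) := by
          simp [divLenA, hc, he]
        have hge : a + (b + 1) ≤ divLenA rest a (b + 1) := divLenA_ge rest a (b + 1)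
        rw [hd]
        have htake : (c :: rest).take (divLenA rest a (b + 1) - (a + b)) =
            c :: rest.take (divLenA rest a (b + 1) - (a + (b + 1))) := by
          have : divLenA rest a (b + 1) - (a + b) =
              (divLenA rest a (b + 1) - (a + (b + 1))) + 1 := by omega
          rw [this, List.take_succ_cons]
        rw [htake]
        have hs : ∃ x s, stack = x :: s := by
          cases stack with
          | nil => simp at hlen; omega
          | cons x s => exact ⟨x, s, rfl⟩
        obtain ⟨x, s, rfl⟩ := hs
        simp only [checkA, hc, if_false]
        exact ih a (b + 1) s (by omega) (by simp at hlen ⊢; omega)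

-- check on the cut prefix is exactly "the first character is '('":
theorem checkA_head : ∀ (c : Char) (rest : List Char),
    checkA [] ((c :: rest).take (divLenA (c :: rest) 0 0)) = (c = '(' : Bool) := by
  intro c rest
  by_cases hc : c = '('
  · subst hc
    have hd : divLenA ('(' :: rest) 0 0 = divLenA rest 1 0 := by simp [divLenA]
    have hge : 1 + 0 ≤ divLenA rest 1 0 := divLenA_ge rest 1 0
    rw [hd]
    have htake : ('(' :: rest).take (divLenA rest 1 0) =
        '(' :: rest.take (divLenA rest 1 0 - (1 + 0)) := by
      have : divLenA rest 1 0 = (divLenA rest 1 0 - (1 + 0)) + 1 := by omega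
      conv_lhs => rw [this]
      simp
    rw [htake]
    simp only [checkA, if_true]
    rw [checkA_take_divLen rest 1 0 ['('] (by omega) (by simp)]
    simp
  · have hge := divLenA_cons_ge c rest 0 0
    have htake : ∃ t, (c :: rest).take (divLenA (c :: rest) 0 0) = c :: t := by
      have : divLenA (c :: rest) 0 0 = (divLenA (c :: rest) 0 0 - 1) + 1 := by omega
      rw [this]
      exact ⟨_, List.take_succ_cons⟩
    obtain ⟨t, ht⟩ := htake
    rw [ht]
    simp [checkA, hc]

-- Main loop invariant: A's while-loop with accumulator equals answer ++ B's value.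
theorem solALoop_eq : ∀ (k : Nat) (p answer : List Char), p.length ≤ k →
    solALoop answer p = answer ++ solB p := by
  intro k
  induction k with
  | zero =>
    intro p answer hlen
    have : p = [] := by cases p with | nil => rfl | cons _ _ => simp at hlen
    subst this
    simp [solALoop, solB]
  | succ k ih =>
    intro p answer hlen
    cases p with
    | nil => simp [solALoop, solB]
    | cons c rest =>
      rw [solALoop, solB]
      have hn : divLenA (c :: rest) 0 0 = splitLenB (c :: rest) 0 0 := by
        have := divLen_eq_splitLen (c :: rest) 0 0
        simpa using this
      have hget : (PySem.List.pyGet? (c :: rest) 0 = some '(') ↔ c = '(' := by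
        simp [PySem.List.pyGet?, PySem.List.pyIdx?]
      have hvlen : ((c :: rest).drop (divLenA (c :: rest) 0 0)).length ≤ k := by
        have := divLenA_cons_ge c rest 0 0
        simp only [List.length_drop, List.length_cons] at *
        omega
      simp only [← hn]
      by_cases hc : c = '('
      · have hcheck : checkA [] ((c :: rest).take (divLenA (c :: rest) 0 0)) = true := by
          rw [checkA_head]; simp [hc]
        rw [hcheck, if_pos (hget.mpr hc)]
        rw [ih _ _ hvlen]
        simp [List.append_assoc]
      · have hcheck : checkA [] ((c :: rest).take (divLenA (c :: rest) 0 0)) = false := by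
          rw [checkA_head]; simp [hc]
        rw [hcheck]
        simp only [Bool.false_eq_true, if_false, if_neg (fun h => hc (hget.mp h))]
        rw [solAList, ih _ _ hvlen]
        simp [convertA_eq_map]

-- ===== VERDICT (by name: the statement is the Claim_ definition above) =====
theorem solution_spec : Claim_equal_solution := by
  intro p _
  unfold Spec_solution solution solution_alt solAList
  rw [solALoop_eq p.toList.length p.toList [] (le_refl _)]
  simp
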